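-- pv_equiv track=rewrite | github.com/swarnava1207/BWT-Bound-DS202 | reverseBWT.py | compute_bwt_runs
-- ===== SOURCE A (Python) =====
-- def compute_bwt_runs(s):
--     """Computes the BWT of a string (appending '$') and returns the run count."""
--     s = s + '$'
--     sa = sorted(range(len(s)), key=lambda i: s[i:])
--     bwt = "".join(s[i - 1] if i > 0 else s[-1] for i in sa)
--
--     runs = 1
--     for i in range(1, len(bwt)):
--         if bwt[i] != bwt[i-1]:
--             runs += 1
--     return runs
-- ===== SOURCE B (Python) =====
-- def compute_bwt_runs(s):
--     """Computes the BWT of a string (appending '$') and returns the run count."""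
--     t = s + '$'
--     n = len(t)
--
--     def suffix_less(i, j):
--         # t[i:] < t[j:], comparing characters in place (no slice allocation)
--         while i < n and j < n:
--             if t[i] != t[j]:
--                 return t[i] < t[j]
--             i += 1
--             j += 1
--         return j < i  # the shorter suffix (exhausted first) is the smaller
--
--     def msort(idx):
--         # bottom-up-free classic top-down merge sort on suffix indices
--         if len(idx) <= 1:
--             return idx
--         mid = len(idx) // 2
--         left = msort(idx[:mid])
--         right = msort(idx[mid:])
--         res = []
--         a = b = 0
--         while a < len(left) and b < len(right):
--             if suffix_less(right[b], left[a]):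
--                 res.append(right[b])
--                 b += 1
--             else:
--                 res.append(left[a])
--                 a += 1
--         res.extend(left[a:])
--         res.extend(right[b:])
--         return res
--
--     sa = msort(list(range(n)))
--     runs = 1
--     for u, v in zip(sa, sa[1:]):
--         if t[u - 1] != t[v - 1]:  # t[i-1] is the BWT character for suffix i (i=0 wraps to '$')
--             runs += 1
--     return runs
-- ===== Notes on version B (the rewrite author's own statement) =====
-- stated objective: alternative
-- what changed: Replaces the builtin sort keyed by O(n) suffix-slice strings with a hand-written top-down merge sort over suffix indices whose comparator walks characters in place, and counts runs in one zip pass over adjacent suffix-array entries instead of materialising the BWT string and indexing it.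
import Mathlib
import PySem

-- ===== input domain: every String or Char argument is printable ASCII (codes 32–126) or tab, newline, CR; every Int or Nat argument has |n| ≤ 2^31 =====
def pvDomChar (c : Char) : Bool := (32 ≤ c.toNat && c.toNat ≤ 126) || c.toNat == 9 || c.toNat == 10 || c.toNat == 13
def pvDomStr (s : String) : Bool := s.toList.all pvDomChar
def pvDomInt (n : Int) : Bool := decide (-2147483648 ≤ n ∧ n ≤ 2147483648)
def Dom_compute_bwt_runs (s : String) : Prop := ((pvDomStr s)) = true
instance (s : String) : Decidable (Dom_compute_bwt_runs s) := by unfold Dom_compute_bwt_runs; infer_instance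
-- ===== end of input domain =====

-- B replaces A's builtin sort keyed by O(n) suffix-slice strings with a hand-written merge sort
-- whose comparator walks characters in place (no slice allocation, stops at first mismatch), and
-- counts runs in one zip pass over adjacent suffix-array entries instead of building the BWT string.

-- ===== PORT A =====
def compute_bwt_runs (s : String) : Int :=
  let t := s.toList ++ ['$']
  let sa := PySem.List.sorted (PySem.List.pyRange 0 (t.length : Int) 1)
      (fun i => PySem.List.slice t (some i) none) false
  let bwt := sa.map (fun i =>
      if i > 0 then PySem.List.pyGetD t (i - 1) ' ' else PySem.List.pyGetD t (-1) ' ')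
  (PySem.List.pyRange 1 (bwt.length : Int) 1).foldl
    (fun runs i =>
      if PySem.List.pyGetD bwt i ' ' ≠ PySem.List.pyGetD bwt (i - 1) ' ' then runs + 1 else runs) 1

-- ===== PORT B =====
-- suffix_less(i, j): t[i:] < t[j:] by walking characters
def bwtSufLess (t : List Char) (n i j : Int) : Bool :=
  if _h : i < n ∧ j < n then
    if PySem.List.pyGetD t i ' ' ≠ PySem.List.pyGetD t j ' ' then
      decide (PySem.List.pyGetD t i ' ' < PySem.List.pyGetD t j ' ')
    else bwtSufLess t n (i + 1) (j + 1)
  else decide (j < i)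
termination_by (n - i).toNat
decreasing_by exact (Int.toNat_lt_toNat (Int.sub_pos.mpr _h.1)).mpr (sub_lt_sub_left (lt_add_one i) n)

-- the merge while-loop of msort (res accumulates; a, b index left/right)
def bwtMerge (t : List Char) (n : Int) (left right : List Int) (a b : Int) (res : List Int) :
    List Int :=
  if _h : a < (left.length : Int) ∧ b < (right.length : Int) then
    if bwtSufLess t n (PySem.List.pyGetD right b 0) (PySem.List.pyGetD left a 0) then
      bwtMerge t n left right a (b + 1) (res ++ [PySem.List.pyGetD right b 0])
    else
      bwtMerge t n left right (a + 1) b (res ++ [PySem.List.pyGetD left a 0])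
  else
    res ++ PySem.List.slice left (some a) none ++ PySem.List.slice right (some b) none
termination_by ((left.length : Int) - a).toNat + ((right.length : Int) - b).toNat
decreasing_by
  · exact Nat.add_lt_add_left
      ((Int.toNat_lt_toNat (Int.sub_pos.mpr _h.2)).mpr (sub_lt_sub_left (lt_add_one b) _)) _
  · exact Nat.add_lt_add_right
      ((Int.toNat_lt_toNat (Int.sub_pos.mpr _h.1)).mpr (sub_lt_sub_left (lt_add_one a) _)) _

def bwtMsort (t : List Char) (n : Int) (idx : List Int) : List Int :=
  if h1 : idx.length ≤ 1 then idx
  else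
    let mid := PySem.Int.floordiv (idx.length : Int) 2
    bwtMerge t n (bwtMsort t n (PySem.List.slice idx none (some mid)))
      (bwtMsort t n (PySem.List.slice idx (some mid) none)) 0 0 []
termination_by idx.length
decreasing_by
  all_goals
    have h2 : 1 < idx.length := Nat.not_le.mp h1
    have hm : PySem.Int.floordiv (idx.length : Int) 2 = ((idx.length / 2 : Nat) : Int) :=
      PySem.Int.floordiv_natCast idx.length 2
  · rw [hm, PySem.List.slice_to idx (Int.natCast_nonneg _), List.length_take, Int.toNat_natCast]
    exact lt_of_le_of_lt (Nat.min_le_left _ _)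
      (Nat.div_lt_self (Nat.lt_trans Nat.zero_lt_one h2) Nat.one_lt_two)
  · rw [hm, PySem.List.slice_from idx (Int.natCast_nonneg _), List.length_drop, Int.toNat_natCast]
    exact Nat.sub_lt (Nat.lt_trans Nat.zero_lt_one h2) (Nat.div_pos h2 Nat.zero_lt_two)

def compute_bwt_runs_alt (s : String) : Int :=
  let t := s.toList ++ ['$']
  let n : Int := t.length
  let sa := bwtMsort t n (PySem.List.pyRange 0 n 1)
  (sa.zip (PySem.List.slice sa (some 1) none)).foldl
    (fun runs p =>
      if PySem.List.pyGetD t (p.1 - 1) ' ' ≠ PySem.List.pyGetD t (p.2 - 1) ' ' then runs + 1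
      else runs) 1

-- ===== PRECONDITION & SPEC =====
def Spec_compute_bwt_runs (s : String) (out : Int) : Prop := out = compute_bwt_runs_alt s
instance (s : String) (out : Int) : Decidable (Spec_compute_bwt_runs s out) := by
  unfold Spec_compute_bwt_runs; infer_instance

-- ===== CLAIM (what is proved, stated in full; the proofs are below) =====
def Claim_equal_compute_bwt_runs : Prop :=
  ∀ (s : String), Dom_compute_bwt_runs s → Spec_compute_bwt_runs s (compute_bwt_runs s)

-- ===== LEMMAS AND PROOFS =====

-- strict key order on suffix indices
def kLT (t : List Char) (a b : Int) : Prop := t.drop a.toNat < t.drop b.toNat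

lemma sufLess_iff (t : List Char) (i j : Int) (hi0 : 0 ≤ i) (hi : i ≤ t.length)
    (hj0 : 0 ≤ j) (hj : j ≤ t.length) :
    (bwtSufLess t t.length i j = true ↔ kLT t i j) := by
  generalize hk : ((t.length : Int) - i).toNat = k
  induction k using Nat.strong_induction_on generalizing i j with
  | _ k IH =>
    rw [bwtSufLess]
    by_cases h : i < (t.length : Int) ∧ j < (t.length : Int)
    · have hiN : i.toNat < t.length := by omega
      have hjN : j.toNat < t.length := by omega
      have egi : PySem.List.pyGetD t i ' ' = t[i.toNat] :=
        PySem.List.pyGetD_eq_getElem t ' ' hi0 (by omega)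
      have egj : PySem.List.pyGetD t j ' ' = t[j.toNat] :=
        PySem.List.pyGetD_eq_getElem t ' ' hj0 (by omega)
      have edi : t.drop i.toNat = t[i.toNat] :: t.drop (i.toNat + 1) :=
        (List.getElem_cons_drop hiN).symm
      have edj : t.drop j.toNat = t[j.toNat] :: t.drop (j.toNat + 1) :=
        (List.getElem_cons_drop hjN).symm
      simp only [dif_pos h, egi, egj]
      by_cases hc : t[i.toNat] = t[j.toNat]
      · have hrec : bwtSufLess t (↑t.length) (i + 1) (j + 1) = true ↔ kLT t (i + 1) (j + 1) :=
          IH (((t.length : Int) - (i + 1)).toNat) (by omega) (i + 1) (j + 1)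
            (by omega) (by omega) (by omega) (by omega) rfl
        rw [if_neg (by simp [hc]), hrec]
        unfold kLT
        have e1 : (i + 1).toNat = i.toNat + 1 := by omega
        have e2 : (j + 1).toNat = j.toNat + 1 := by omega
        rw [e1, e2, edi, edj, hc, List.cons_lt_cons_iff]
        simp
      · rw [if_pos (by simp [hc])]
        unfold kLT
        rw [edi, edj, List.cons_lt_cons_iff]
        simp [hc]
    · rw [dif_neg h]
      unfold kLT
      simp only [decide_eq_true_eq]
      rcases (by omega : i = (t.length : Int) ∨ (j = (t.length : Int) ∧ i < t.length))
        with he | ⟨he, hlt⟩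
      · have hnili : t.drop i.toNat = [] := List.drop_eq_nil_of_le (by omega)
        rw [hnili]
        by_cases hjn : j < (t.length : Int)
        · have hd : t.drop j.toNat = t[j.toNat] :: t.drop (j.toNat + 1) :=
            (List.getElem_cons_drop (by omega : j.toNat < t.length)).symm
          rw [hd]
          exact iff_of_true (by omega) (List.nil_lt_cons _ _)
        · have hnilj : t.drop j.toNat = [] := List.drop_eq_nil_of_le (by omega)
          rw [hnilj]
          exact iff_of_false (by omega) (List.not_lt_nil _)
      · have hnilj : t.drop j.toNat = [] := List.drop_eq_nil_of_le (by omega)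
        rw [hnilj]
        exact iff_of_false (by omega) (List.not_lt_nil _)

lemma drop_ne_of_ne (t : List Char) (i j : Int) (hi0 : 0 ≤ i) (hi : i ≤ t.length)
    (hj0 : 0 ≤ j) (hj : j ≤ t.length) (hne : i ≠ j) :
    t.drop i.toNat ≠ t.drop j.toNat := by
  intro hcontra
  have := congrArg List.length hcontra
  simp only [List.length_drop] at this
  omega

-- clean recursive merge, used only to reason about the bwtMerge while-loop
def mergeL (lt : Int → Int → Bool) : List Int → List Int → List Int
  | [], r => r
  | l, [] => l
  | x :: xs, y :: ys =>
      if lt y x then y :: mergeL lt (x :: xs) ys else x :: mergeL lt xs (y :: ys)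
termination_by l r => l.length + r.length

lemma bwtMerge_eq_mergeL (t : List Char) (n : Int) (L R : List Int) (a b : Int) (res : List Int)
    (ha : 0 ≤ a) (hb : 0 ≤ b) :
    bwtMerge t n L R a b res = res ++ mergeL (bwtSufLess t n) (L.drop a.toNat) (R.drop b.toNat) := by
  generalize hk : ((L.length : Int) - a).toNat + ((R.length : Int) - b).toNat = k
  induction k using Nat.strong_induction_on generalizing a b res with
  | _ k IH =>
    rw [bwtMerge]
    by_cases h : a < (L.length : Int) ∧ b < (R.length : Int)
    · have eda : L.drop a.toNat = L[a.toNat] :: L.drop (a.toNat + 1) :=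
        (List.getElem_cons_drop (by omega : a.toNat < L.length)).symm
      have edb : R.drop b.toNat = R[b.toNat] :: R.drop (b.toNat + 1) :=
        (List.getElem_cons_drop (by omega : b.toNat < R.length)).symm
      have ega : PySem.List.pyGetD L a 0 = L[a.toNat] :=
        PySem.List.pyGetD_eq_getElem L 0 ha (by omega)
      have egb : PySem.List.pyGetD R b 0 = R[b.toNat] :=
        PySem.List.pyGetD_eq_getElem R 0 hb (by omega)
      rw [dif_pos h]
      simp only [ega, egb]
      by_cases hlt : bwtSufLess t n R[b.toNat] L[a.toNat] = true
      · rw [if_pos hlt,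
          IH (((L.length : Int) - a).toNat + ((R.length : Int) - (b + 1)).toNat) (by omega)
            a (b + 1) _ ha (by omega) rfl]
        have e2 : (b + 1).toNat = b.toNat + 1 := by omega
        rw [e2, eda, edb, mergeL, if_pos hlt]
        simp
      · rw [if_neg hlt,
          IH (((L.length : Int) - (a + 1)).toNat + ((R.length : Int) - b).toNat) (by omega)
            (a + 1) b _ (by omega) hb rfl]
        have e1 : (a + 1).toNat = a.toNat + 1 := by omega
        rw [e1, eda, edb, mergeL, if_neg hlt]
        simp
    · rw [dif_neg h, PySem.List.slice_from L ha, PySem.List.slice_from R hb]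
      rcases (by omega : (L.length : Int) ≤ a ∨ (R.length : Int) ≤ b) with hc | hc
      · rw [List.drop_eq_nil_of_le (by omega : L.length ≤ a.toNat)]
        cases R.drop b.toNat <;> simp [mergeL]
      · rw [List.drop_eq_nil_of_le (by omega : R.length ≤ b.toNat)]
        cases L.drop a.toNat <;> simp [mergeL]

lemma mergeL_perm (lt : Int → Int → Bool) (xs ys : List Int) :
    (mergeL lt xs ys).Perm (xs ++ ys) := by
  fun_induction mergeL lt xs ys with
  | case1 r => simp
  | case2 x xs => simp
  | case3 x xs y ys hlt IH =>
    refine List.Perm.trans (List.Perm.cons y IH) ?_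
    have e : y :: (x :: xs ++ ys) = [y] ++ (x :: xs) ++ ys := by simp
    rw [e]
    refine List.Perm.trans (List.Perm.append_right ys List.perm_append_comm) ?_
    simp
  | case4 x xs y ys hlt IH =>
    exact List.Perm.cons x IH

lemma mergeL_pairwise (t : List Char) (xs ys : List Int)
    (hx : ∀ x ∈ xs, 0 ≤ x ∧ x ≤ (t.length : Int)) (hy : ∀ y ∈ ys, 0 ≤ y ∧ y ≤ (t.length : Int))
    (hne : ∀ x ∈ xs, ∀ y ∈ ys, t.drop x.toNat ≠ t.drop y.toNat)
    (px : xs.Pairwise (kLT t)) (py : ys.Pairwise (kLT t)) :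
    (mergeL (bwtSufLess t t.length) xs ys).Pairwise (kLT t) := by
  fun_induction mergeL (bwtSufLess t t.length) xs ys with
  | case1 r => exact py
  | case2 x xs => exact px
  | case3 x xs y ys hlt IH =>
    have hxm := hx x (by simp)
    have hym := hy y (by simp)
    have hylt : kLT t y x := by
      rw [← sufLess_iff t y x hym.1 hym.2 hxm.1 hxm.2]; exact hlt
    constructor
    · intro z hz
      have hz' : z ∈ (x :: xs) ++ ys :=
        (mergeL_perm _ _ _).mem_iff.mp hz
      rcases List.mem_append.mp hz' with hzl | hzr
      · rcases List.mem_cons.mp hzl with rfl | hzx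
        · exact hylt
        · exact lt_trans hylt ((List.pairwise_cons.mp px).1 z hzx)
      · exact (List.pairwise_cons.mp py).1 z hzr
    · exact IH hx (fun a ha => hy a (by simp [ha]))
        (fun a ha b hb => hne a ha b (by simp [hb])) px (List.pairwise_cons.mp py).2
  | case4 x xs y ys hlt IH =>
    have hxm := hx x (by simp)
    have hym := hy y (by simp)
    have hxlt : kLT t x y := by
      have hnlt : ¬ kLT t y x := by
        rw [← sufLess_iff t y x hym.1 hym.2 hxm.1 hxm.2]; simp [hlt]
      have hneq : t.drop x.toNat ≠ t.drop y.toNat := hne x (by simp) y (by simp)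
      unfold kLT at *
      rcases lt_trichotomy (t.drop x.toNat) (t.drop y.toNat) with h | h | h
      · exact h
      · exact absurd h hneq
      · exact absurd h hnlt
    constructor
    · intro z hz
      have hz' : z ∈ xs ++ (y :: ys) :=
        (mergeL_perm _ _ _).mem_iff.mp hz
      rcases List.mem_append.mp hz' with hzl | hzr
      · exact (List.pairwise_cons.mp px).1 z hzl
      · rcases List.mem_cons.mp hzr with rfl | hzy
        · exact hxlt
        · exact lt_trans hxlt ((List.pairwise_cons.mp py).1 z hzy)
    · exact IH (fun a ha => hx a (by simp [ha])) hy
        (fun a ha b hb => hne a (by simp [ha]) b hb) (List.pairwise_cons.mp px).2 py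

lemma bwtMsort_perm (t : List Char) (n : Int) (idx : List Int) :
    (bwtMsort t n idx).Perm idx := by
  fun_induction bwtMsort t n idx with
  | case1 idx h => exact List.Perm.refl idx
  | case2 idx h mid IH1 IH2 =>
    rw [bwtMerge_eq_mergeL t n _ _ 0 0 [] le_rfl le_rfl]
    simp only [Int.toNat_zero, List.drop_zero, List.nil_append]
    refine List.Perm.trans (mergeL_perm _ _ _) ?_
    refine List.Perm.trans (List.Perm.append IH1 IH2) ?_
    have hm : mid = ((idx.length / 2 : Nat) : Int) := by
      exact_mod_cast PySem.Int.floordiv_natCast idx.length 2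
    rw [hm, PySem.List.slice_to idx (Int.natCast_nonneg _),
      PySem.List.slice_from idx (Int.natCast_nonneg _)]
    simp

lemma bwtMsort_pairwise (t : List Char) (idx : List Int)
    (hb : ∀ x ∈ idx, 0 ≤ x ∧ x ≤ (t.length : Int)) (hnd : idx.Nodup) :
    (bwtMsort t t.length idx).Pairwise (kLT t) := by
  fun_induction bwtMsort t (t.length : Int) idx with
  | case1 idx h =>
    match idx, h with
    | [], _ => exact List.Pairwise.nil
    | [x], _ => simp
  | case2 idx h mid IH1 IH2 =>
    have hm : mid = ((idx.length / 2 : Nat) : Int) := by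
      exact_mod_cast PySem.Int.floordiv_natCast idx.length 2
    have hsl : PySem.List.slice idx none (some mid) = idx.take (idx.length / 2) := by
      rw [hm, PySem.List.slice_to idx (Int.natCast_nonneg _)]; simp; omega
    have hsr : PySem.List.slice idx (some mid) none = idx.drop (idx.length / 2) := by
      rw [hm, PySem.List.slice_from idx (Int.natCast_nonneg _)]; simp; omega
    have hsplit : idx.take (idx.length / 2) ++ idx.drop (idx.length / 2) = idx :=
      List.take_append_drop _ idx
    have hndl : (idx.take (idx.length / 2)).Nodup := List.Nodup.sublist (List.take_sublist _ _) hnd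
    have hndr : (idx.drop (idx.length / 2)).Nodup := List.Nodup.sublist (List.drop_sublist _ _) hnd
    have hbl : ∀ x ∈ idx.take (idx.length / 2), 0 ≤ x ∧ x ≤ (t.length : Int) :=
      fun x hx => hb x (List.mem_of_mem_take hx)
    have hbr : ∀ x ∈ idx.drop (idx.length / 2), 0 ≤ x ∧ x ≤ (t.length : Int) :=
      fun x hx => hb x (List.mem_of_mem_drop hx)
    rw [bwtMerge_eq_mergeL t _ _ _ 0 0 [] le_rfl le_rfl]
    simp only [Int.toNat_zero, List.drop_zero, List.nil_append]
    have pl : (bwtMsort t t.length (PySem.List.slice idx none (some mid))).Pairwise (kLT t) := by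
      apply IH1 <;> rw [hsl] <;> assumption
    have pr : (bwtMsort t t.length (PySem.List.slice idx (some mid) none)).Pairwise (kLT t) := by
      apply IH2 <;> rw [hsr] <;> assumption
    apply mergeL_pairwise t _ _ _ _ _ pl pr
    · intro x hx
      exact hbl x (by rwa [← hsl, ← (bwtMsort_perm t _ _).mem_iff])
    · intro y hy
      exact hbr y (by rwa [← hsr, ← (bwtMsort_perm t _ _).mem_iff])
    · intro x hx y hy
      have hx' : x ∈ idx.take (idx.length / 2) := by
        rwa [← hsl, ← (bwtMsort_perm t _ _).mem_iff]
      have hy' : y ∈ idx.drop (idx.length / 2) := by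
        rwa [← hsr, ← (bwtMsort_perm t _ _).mem_iff]
      have hxy : x ≠ y := by
        have hdisj := List.disjoint_take_drop (m := idx.length / 2) (n := idx.length / 2) hnd le_rfl
        exact fun hcontra => hdisj hx' (hcontra ▸ hy')
      have hbx := hbl x hx'
      have hby := hbr y hy'
      exact drop_ne_of_ne t x y hbx.1 hbx.2 hby.1 hby.2 hxy

-- adjacent-difference counter, the common shape of both run-count loops
def runAux (prev : Char) : List Char → Int → Int
  | [], acc => acc
  | x :: l, acc => runAux x l (if x ≠ prev then acc + 1 else acc)

lemma zipfold_eq_runAux (f : Int → Char) (l : List Int) (x : Int) (init : Int) :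
    ((x :: l).zip l).foldl (fun r p => if f (p.1 - 1) ≠ f (p.2 - 1) then r + 1 else r) init
      = runAux (f (x - 1)) (l.map (fun i => f (i - 1))) init := by
  induction l generalizing x init with
  | nil => simp [runAux]
  | cons y ys IH =>
    simp only [List.zip_cons_cons, List.foldl_cons, List.map_cons, runAux]
    rw [← IH y]
    by_cases h : f (x - 1) = f (y - 1)
    · simp [h]
    · simp [h, Ne.symm h]

lemma idxfold_eq_runAux (c : List Char) (k : Nat) (init : Int) (hk1 : 1 ≤ k) (hk : k ≤ c.length) :
    (PySem.List.pyRange (k : Int) (c.length : Int) 1).foldl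
      (fun r i => if PySem.List.pyGetD c i ' ' ≠ PySem.List.pyGetD c (i - 1) ' ' then r + 1 else r)
      init
    = runAux (c.getD (k - 1) ' ') (c.drop k) init := by
  generalize hm : c.length - k = m
  induction m generalizing k init with
  | zero =>
    have hke : k = c.length := by omega
    have : PySem.List.pyRange (k : Int) (c.length : Int) 1 = [] := by
      exact PySem.List.pyRange_one_eq_nil (by omega)
    rw [this, hke, List.drop_length]
    simp [runAux]
  | succ m IH =>
    have hklt : k < c.length := by omega
    rw [PySem.List.pyRange_one_cons (by exact_mod_cast hklt)]
    simp only [List.foldl_cons]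
    have eg : PySem.List.pyGetD c (k : Int) ' ' = c.getD k ' ' := PySem.List.pyGetD_natCast c k ' '
    have eg2 : PySem.List.pyGetD c ((k : Int) - 1) ' ' = c.getD (k - 1) ' ' := by
      have e : (k : Int) - 1 = ((k - 1 : Nat) : Int) := by omega
      rw [e, PySem.List.pyGetD_natCast c (k-1) ' ']
    have ed : c.drop k = c.getD k ' ' :: c.drop (k + 1) := by
      rw [List.getD_eq_getElem c ' ' hklt]
      exact (List.getElem_cons_drop hklt).symm
    have e1 : (k : Int) + 1 = ((k + 1 : Nat) : Int) := by push_cast; ring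
    have e2 : k + 1 - 1 = k := by omega
    rw [e1, IH (k + 1) _ (by omega) (by omega) (by omega), e2, ed, eg, eg2]
    rfl

lemma runs_main (s : String) : compute_bwt_runs s = compute_bwt_runs_alt s := by
  simp only [compute_bwt_runs, compute_bwt_runs_alt]
  set t := s.toList ++ ['$'] with ht
  have htlen : 1 ≤ t.length := by simp [ht]
  set ys := bwtMsort t (t.length : Int) (PySem.List.pyRange 0 (t.length : Int) 1) with hys
  have hperm : ys.Perm (PySem.List.pyRange 0 (t.length : Int) 1) := bwtMsort_perm _ _ _
  have hmem : ∀ x ∈ ys, 0 ≤ x ∧ x < (t.length : Int) := by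
    intro x hx
    exact PySem.List.mem_pyRange_one.mp (hperm.mem_iff.mp hx)
  have hnd : (PySem.List.pyRange 0 (t.length : Int) 1).Nodup := by
    rw [PySem.List.pyRange_zero_natCast]
    exact (List.nodup_range).map (fun a b hab => by exact_mod_cast hab)
  have hpw : ys.Pairwise (kLT t) := by
    apply bwtMsort_pairwise t _ _ hnd
    intro x hx
    have := PySem.List.mem_pyRange_one.mp hx
    omega
  have hpwk : ys.Pairwise (fun a b =>
      PySem.List.slice t (some a) none < PySem.List.slice t (some b) none) := by
    refine hpw.imp_of_mem (fun {a b} ha hb hab => ?_)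
    rw [PySem.List.slice_from t (hmem a ha).1, PySem.List.slice_from t (hmem b hb).1]
    exact hab
  have hinst : (fun (a b : List Char) => a.decidableLT b)
      = (@LinearOrder.toDecidableLT (List Char) _) := by
    funext a b; exact Subsingleton.elim _ _
  have hsa : @PySem.List.sorted Int (List Char) List.instLT (fun a b => a.decidableLT b)
      (PySem.List.pyRange 0 (t.length : Int) 1)
      (fun i => PySem.List.slice t (some i) none) false = ys := by
    have h := PySem.List.sorted_eq_of_perm_of_pairwise_lt
      (PySem.List.pyRange 0 (t.length : Int) 1) ys
      (fun i => PySem.List.slice t (some i) none) hperm hpwk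
    convert h using 2
  rw [hsa]
  -- the two BWT-character maps agree on ys
  have hmapeq : ys.map (fun i =>
      if i > 0 then PySem.List.pyGetD t (i - 1) ' ' else PySem.List.pyGetD t (-1) ' ')
      = ys.map (fun i => PySem.List.pyGetD t (i - 1) ' ') := by
    apply List.map_congr_left
    intro i hi
    by_cases hpos : i > 0
    · rw [if_pos hpos]
    · have : i = 0 := by have := hmem i hi; omega
      rw [if_neg hpos, this]
      norm_num
  rw [hmapeq]
  set c := ys.map (fun i => PySem.List.pyGetD t (i - 1) ' ') with hc
  have hyslen : ys.length = t.length := by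
    rw [hperm.length_eq, PySem.List.pyRange_zero_natCast, List.length_map, List.length_range]
  have hclen : c.length = t.length := by rw [hc, List.length_map, hyslen]
  -- A's indexed loop = runAux
  have hA : (PySem.List.pyRange (1 : Int) (c.length : Int) 1).foldl
      (fun r i => if PySem.List.pyGetD c i ' ' ≠ PySem.List.pyGetD c (i - 1) ' ' then r + 1 else r) 1
      = runAux (c.getD 0 ' ') (c.drop 1) 1 :=
    idxfold_eq_runAux c 1 1 le_rfl (by omega)
  -- split ys
  obtain ⟨y0, yr, hy0⟩ : ∃ y0 yr, ys = y0 :: yr := by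
    cases hcase : ys with
    | nil => rw [hcase] at hyslen; simp at hyslen; omega
    | cons a l => exact ⟨a, l, rfl⟩
  have hccons : c = PySem.List.pyGetD t (y0 - 1) ' ' :: yr.map (fun i => PySem.List.pyGetD t (i - 1) ' ') := by
    rw [hc, hy0, List.map_cons]
  -- B's zip loop = runAux
  have hB : ((ys.zip (PySem.List.slice ys (some 1) none)).foldl
      (fun r p => if PySem.List.pyGetD t (p.1 - 1) ' ' ≠ PySem.List.pyGetD t (p.2 - 1) ' '
        then r + 1 else r) 1)
      = runAux (c.getD 0 ' ') (c.drop 1) 1 := by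
    rw [PySem.List.slice_from_one, hy0]
    simp only [List.tail_cons]
    rw [zipfold_eq_runAux (fun i => PySem.List.pyGetD t i ' ') yr y0 1]
    rw [hccons]
    simp
  rw [hA, hB]

-- ===== VERDICT (by name: the statement is the Claim_ definition above) =====
theorem compute_bwt_runs_spec : Claim_equal_compute_bwt_runs := by
  intro s _
  unfold Spec_compute_bwt_runs
  exact runs_main s
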